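-- pv_equiv track=rewrite | github.com/1104030360/Library_System | backend/ai_service/rag_prompt_builder.py | format_library_rules
-- ===== SOURCE A (Python) =====
-- from typing import Dict, List, Any, Optional
--
-- def format_library_rules(rules: List[Dict[str, Any]]) -> str:
--     """
--     格式化圖書館規則
--
--     Args:
--         rules: 規則列表
--
--     Returns:
--         格式化的規則字串
--     """
--     if not rules:
--         return "無相關規則。"
--
--     result = []
--     result.append(f"圖書館規則（共 {len(rules)} 條）：")
--
--     # 按類別分組
--     by_category: Dict[str, List[Dict[str, Any]]] = {}
--     for rule in rules:
--         category = rule.get("category", "其他")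
--         if category not in by_category:
--             by_category[category] = []
--         by_category[category].append(rule)
--
--     # 輸出每個類別的規則
--     for category, category_rules in by_category.items():
--         result.append(f"\n【{category}】")
--         for idx, rule in enumerate(category_rules, 1):
--             question = rule.get("question", "")
--             answer = rule.get("answer", "")
--             result.append(f"{idx}. {question}")
--             result.append(f"   {answer}")
--
--     return "\n".join(result)
-- ===== SOURCE B (Python) =====
-- def format_library_rules(rules):
--     if not rules:
--         return "無相關規則。"
--     lines = [f"圖書館規則（共 {len(rules)} 條）："]
--     categories = list(dict.fromkeys(r.get("category", "其他") for r in rules))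
--     for cat in categories:
--         lines.append(f"\n【{cat}】")
--         idx = 0
--         for r in rules:
--             if r.get("category", "其他") == cat:
--                 idx += 1
--                 lines.append(f"{idx}. {r.get('question', '')}")
--                 lines.append(f"   {r.get('answer', '')}")
--     return "\n".join(lines)
-- ===== Notes on version B (the rewrite author's own statement) =====
-- stated objective: alternative
-- what changed: B builds no grouping dict: it computes the ordered distinct categories with dict.fromkeys and then re-scans the rules list once per category with a running counter, instead of A's dict of category->rules iterated via items()/enumerate.
import Mathlib
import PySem

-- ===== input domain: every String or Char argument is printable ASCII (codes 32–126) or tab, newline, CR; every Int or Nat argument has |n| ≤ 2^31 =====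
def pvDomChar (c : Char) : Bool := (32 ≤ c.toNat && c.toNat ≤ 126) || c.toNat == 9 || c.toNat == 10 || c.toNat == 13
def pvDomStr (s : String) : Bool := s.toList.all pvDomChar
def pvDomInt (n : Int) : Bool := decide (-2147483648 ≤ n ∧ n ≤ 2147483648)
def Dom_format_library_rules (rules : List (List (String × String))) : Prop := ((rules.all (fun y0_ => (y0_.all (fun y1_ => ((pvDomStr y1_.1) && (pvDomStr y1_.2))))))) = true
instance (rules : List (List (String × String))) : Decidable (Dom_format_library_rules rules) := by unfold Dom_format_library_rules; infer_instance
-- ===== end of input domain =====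

-- ===== PORT A =====
-- One-line: B replaces A's grouping dict by an ordered distinct-category pass plus one filtering re-scan of the rules per category (alternative decomposition, same output): it never builds a grouping dict; header line and per-rule lines are identical.
-- rule.get(k, dflt) on a dict = first-match lookup on the association list
def pvGet (rule : List (String × String)) (k dflt : String) : String :=
  (PySem.Dict.mk rule).getD k dflt

def format_library_rules (rules : List (List (String × String))) : String :=
  if rules = [] then "無相關規則。"
  else
    let result : List String := ["圖書館規則（共 " ++ PySem.Int.toStr rules.length ++ " 條）："]
    let byCategory : PySem.Dict String (List (List (String × String))) :=
      rules.foldl (fun d rule =>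
        let category := pvGet rule "category" "其他"
        let d := if d.contains category then d else d.insert category []
        d.modify category [] (fun l => l ++ [rule])) PySem.Dict.empty
    let result := byCategory.items.foldl (fun acc p =>
      let acc := acc ++ ["\n【" ++ p.1 ++ "】"]
      (PySem.List.enumerate p.2 1).foldl (fun acc iq =>
        let question := pvGet iq.2 "question" ""
        let answer := pvGet iq.2 "answer" ""
        (acc ++ [PySem.Int.toStr iq.1 ++ ". " ++ question]) ++ ["   " ++ answer]) acc) result
    PySem.Str.join "\n" result

-- ===== PORT B =====
def format_library_rules_alt (rules : List (List (String × String))) : String :=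
  if rules = [] then "無相關規則。"
  else
    let header := "圖書館規則（共 " ++ PySem.Int.toStr rules.length ++ " 條）："
    let categories := PySem.List.dedup (rules.map (fun r => pvGet r "category" "其他"))
    let lines := categories.foldl (fun acc cat =>
      let acc := acc ++ ["\n【" ++ cat ++ "】"]
      (rules.foldl (fun (st : List String × Int) r =>
        if pvGet r "category" "其他" == cat then
          let idx := st.2 + 1
          (st.1 ++ [PySem.Int.toStr idx ++ ". " ++ pvGet r "question" ""]
                ++ ["   " ++ pvGet r "answer" ""], idx)
        else st) (acc, 0)).1) [header]
    PySem.Str.join "\n" lines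

-- ===== PRECONDITION & SPEC =====
def Spec_format_library_rules (rules : List (List (String × String))) (out : String) : Prop := out = format_library_rules_alt rules
instance (rules : List (List (String × String))) (out : String) : Decidable (Spec_format_library_rules rules out) := by unfold Spec_format_library_rules; infer_instance

-- ===== CLAIM (what is proved, stated in full; the proofs are below) =====
def Claim_equal_format_library_rules : Prop := ∀ (rules : List (List (String × String))), Dom_format_library_rules rules → Spec_format_library_rules rules (format_library_rules rules)

-- ===== LEMMAS AND PROOFS =====

theorem notKey {κ : Type} [BEq κ] [LawfulBEq κ] {ν : Type} (d : PySem.Dict κ ν) (c : κ)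
    (h : ¬ d.contains c = true) : ∀ p ∈ d.items, p.1 ≠ c := by
  intro p hp hpc
  exact h (by
    rw [PySem.Dict.contains_iff_mem_keys]
    exact hpc ▸ PySem.Dict.mem_keys_of_mem_items d hp)

theorem stepEq (d : PySem.Dict String (List (List (String × String)))) (c : String) (rule : List (String × String)) :
    ((if d.contains c then d else d.insert c []).modify c [] (fun l => l ++ [rule]))
      = d.modify c [] (fun l => l ++ [rule]) := by
  by_cases h : d.contains c
  · simp [h]
  · simp only [h, Bool.false_eq_true, if_false]
    apply PySem.Dict.ext
    simp [PySem.Dict.modify, PySem.Dict.insert, h]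
    constructor
    · conv_rhs => rw [← List.map_id d.items]
      apply List.map_congr_left
      intro p hp
      simp [notKey d c h p hp]
    · have h2 : PySem.Dict.mk (d.items ++ [(c, ([] : List (List (String × String))))]) = d.insert c [] := by
        apply PySem.Dict.ext
        simp [PySem.Dict.insert, h]
      rw [h2, PySem.Dict.getD_insert_self]
      exact (PySem.Dict.getD_of_not_contains d [] (by simpa using h)).symm

-- the grouping dict built by port A, characterised
theorem group_items (rules : List (List (String × String))) :
    (rules.foldl (fun d rule =>
        let category := pvGet rule "category" "其他"
        let d := if d.contains category then d else d.insert category []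
        d.modify category [] (fun l => l ++ [rule])) PySem.Dict.empty).items
    = (PySem.List.dedup (rules.map (fun r => pvGet r "category" "其他"))).map
        (fun c => (c, rules.filter (fun r => pvGet r "category" "其他" == c))) := by
  have hfun : (fun (d : PySem.Dict String (List (List (String × String)))) rule =>
        let category := pvGet rule "category" "其他"
        let d := if d.contains category then d else d.insert category []
        d.modify category [] (fun l => l ++ [rule]))
      = (fun d rule => d.modify (pvGet rule "category" "其他") [] (fun l => l ++ [rule])) := by
    funext d r
    exact stepEq d (pvGet r "category" "其他") r
  rw [hfun]
  have hnd : (rules.foldl (fun d rule => d.modify (pvGet rule "category" "其他") [] (fun l => l ++ [rule]))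
      PySem.Dict.empty).keys.Nodup :=
    PySem.Dict.nodup_keys_foldl_modify_key rules (fun r => pvGet r "category" "其他") _ _ _
      PySem.Dict.nodup_keys_empty
  rw [PySem.Dict.items_eq_map_keys _ hnd []]
  have hkeys : (rules.foldl (fun d rule => d.modify (pvGet rule "category" "其他") [] (fun l => l ++ [rule]))
      PySem.Dict.empty).keys = PySem.List.dedup (rules.map (fun r => pvGet r "category" "其他")) := by
    rw [PySem.Dict.keys_foldl_modify_key]
    simp [PySem.Dict.keys_empty, PySem.Set.update_nil_left]
  rw [hkeys]
  apply List.map_congr_left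
  intro c _
  have hg : (rules.foldl (fun d rule => d.modify (pvGet rule "category" "其他") [] (fun l => l ++ [rule]))
      PySem.Dict.empty).getD c []
      = rules.filter (fun r => pvGet r "category" "其他" == c) := by
    have := PySem.Dict.getD_foldl_modify_append
      (l := rules.map (fun r => (pvGet r "category" "其他", r)))
      (d := (PySem.Dict.empty : PySem.Dict String (List (List (String × String))))) (c := c)
    rw [List.foldl_map] at this
    simp only [PySem.Dict.getD_empty, List.nil_append] at this
    rw [this]
    rw [List.filter_map]
    simp [List.map_map, Function.comp_def]
  rw [hg]

-- B's counter loop over all rules = A's enumerate loop over the filtered list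
theorem inner_loop (cat : String) (rs : List (List (String × String))) :
    ∀ (acc : List String) (n : Int),
    (PySem.List.enumerate (rs.filter (fun r => pvGet r "category" "其他" == cat)) (n+1)).foldl
      (fun acc iq =>
        let question := pvGet iq.2 "question" ""
        let answer := pvGet iq.2 "answer" ""
        (acc ++ [PySem.Int.toStr iq.1 ++ ". " ++ question]) ++ ["   " ++ answer]) acc
    = (rs.foldl (fun (st : List String × Int) r =>
        if pvGet r "category" "其他" == cat then
          let idx := st.2 + 1
          (st.1 ++ [PySem.Int.toStr idx ++ ". " ++ pvGet r "question" ""]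
                ++ ["   " ++ pvGet r "answer" ""], idx)
        else st) (acc, n)).1 := by
  induction rs with
  | nil => intro acc n; simp [PySem.List.enumerate_nil]
  | cons r rs ih =>
    intro acc n
    by_cases h : pvGet r "category" "其他" == cat
    · simp only [List.filter_cons, h, if_true, List.foldl_cons,
        PySem.List.enumerate_cons]
      rw [show n + 1 + 1 = (n+1) + 1 by ring] at *
      exact ih _ (n+1)
    · simp only [List.filter_cons, h, List.foldl_cons, Bool.false_eq_true, if_false]
      exact ih acc n

-- ===== VERDICT (by name: the statement is the Claim_ definition above) =====
theorem format_library_rules_spec : Claim_equal_format_library_rules := by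
  intro rules _
  unfold Spec_format_library_rules format_library_rules format_library_rules_alt
  by_cases h : rules = []
  · simp [h]
  · simp only [h, if_false]
    congr 1
    rw [group_items, List.foldl_map]
    refine congrFun (congrFun (congrArg List.foldl ?_) _) _
    funext acc cat
    conv_lhs => rw [show (1 : Int) = 0 + 1 by norm_num]
    exact inner_loop cat rules (acc ++ ["\n【" ++ cat ++ "】"]) 0
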